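-- pv_equiv track=rewrite | github.com/diqing233/qingscreen-translator | src/core/overlay_layout.py | _rect_from_box
-- ===== SOURCE A (Python) =====
-- def _rect_from_box(box):
--     xs = [point[0] for point in box]
--     ys = [point[1] for point in box]
--     left = min(xs)
--     top = min(ys)
--     right = max(xs)
--     bottom = max(ys)
--     return {
--         'x': left,
--         'y': top,
--         'width': max(0, right - left),
--         'height': max(0, bottom - top),
--     }
-- ===== SOURCE B (Python) =====
-- def _rect_from_box(box):
--     it = iter(box)
--     try:
--         px, py = next(it)
--     except StopIteration:
--         raise ValueError("empty box")
--     left = right = px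
--     top = bottom = py
--     for px, py in it:
--         if px < left:
--             left = px
--         elif px > right:
--             right = px
--         if py < top:
--             top = py
--         elif py > bottom:
--             bottom = py
--     return {
--         'x': left,
--         'y': top,
--         'width': max(0, right - left),
--         'height': max(0, bottom - top),
--     }
-- ===== Notes on version B (the rewrite author's own statement) =====
-- stated objective: alternative
-- what changed: Replaces two list comprehensions plus four separate min/max reductions (six scans) with one single-pass loop maintaining four running accumulators seeded from the first point.
import Mathlib
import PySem

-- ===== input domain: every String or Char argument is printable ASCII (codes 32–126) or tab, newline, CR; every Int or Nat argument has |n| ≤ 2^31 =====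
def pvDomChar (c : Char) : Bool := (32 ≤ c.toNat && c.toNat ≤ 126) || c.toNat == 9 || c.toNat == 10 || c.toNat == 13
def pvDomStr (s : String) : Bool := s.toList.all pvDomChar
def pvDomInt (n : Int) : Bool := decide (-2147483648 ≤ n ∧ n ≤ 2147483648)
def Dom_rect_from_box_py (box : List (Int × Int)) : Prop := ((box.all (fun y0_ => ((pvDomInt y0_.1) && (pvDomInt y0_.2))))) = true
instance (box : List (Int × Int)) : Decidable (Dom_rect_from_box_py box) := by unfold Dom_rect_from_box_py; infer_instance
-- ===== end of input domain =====

-- B replaces A's two comprehensions plus four min/max reductions with one single-pass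
-- loop over the points maintaining four running accumulators seeded from the first point.

-- ===== PORT A =====
-- min(xs)/max(xs) raise ValueError on the empty list → PySem.List.min?/max? return none; Pre_ excludes [].
def rect_from_box_py (box : List (Int × Int)) : List (String × Int) :=
  let xs := box.map (fun point => point.1)
  let ys := box.map (fun point => point.2)
  match PySem.List.min? xs (fun v => v), PySem.List.min? ys (fun v => v),
        PySem.List.max? xs (fun v => v), PySem.List.max? ys (fun v => v) with
  | some left, some top, some right, some bottom =>
      [("x", left), ("y", top), ("width", max 0 (right - left)), ("height", max 0 (bottom - top))]
  | _, _, _, _ => []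

-- ===== PORT B =====
-- one step of B's loop body (the two if/elif pairs)
def pvStepB (acc : Int × Int × Int × Int) (p : Int × Int) : Int × Int × Int × Int :=
  let left := acc.1; let right := acc.2.1; let top := acc.2.2.1; let bottom := acc.2.2.2
  let left' := if p.1 < left then p.1 else left
  let right' := if p.1 < left then right else if p.1 > right then p.1 else right
  let top' := if p.2 < top then p.2 else top
  let bottom' := if p.2 < top then bottom else if p.2 > bottom then p.2 else bottom
  (left', right', top', bottom')

def rect_from_box_py_alt (box : List (Int × Int)) : List (String × Int) :=
  match box with
  | [] => []  -- B raises ValueError here; excluded by Pre_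
  | (px, py) :: rest =>
      let st := rest.foldl pvStepB (px, px, py, py)
      [("x", st.1), ("y", st.2.2.1),
       ("width", max 0 (st.2.1 - st.1)), ("height", max 0 (st.2.2.2 - st.2.2.1))]

-- ===== PRECONDITION & SPEC =====
-- A raises ValueError (min of empty sequence) on the empty list; both programs raise there.
def Pre_rect_from_box_py (box : List (Int × Int)) : Prop := box ≠ []
instance (box : List (Int × Int)) : Decidable (Pre_rect_from_box_py box) := by unfold Pre_rect_from_box_py; infer_instance
def pvWitness_rect_from_box_py : (List (Int × Int)) := [(1, 2), (5, -3)]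

def Spec_rect_from_box_py (box : List (Int × Int)) (out : List (String × Int)) : Prop := out = rect_from_box_py_alt box
instance (box : List (Int × Int)) (out : List (String × Int)) : Decidable (Spec_rect_from_box_py box out) := by unfold Spec_rect_from_box_py; infer_instance

-- ===== CLAIM (what is proved, stated in full; the proofs are below) =====
def Claim_equal_rect_from_box_py : Prop := ∀ (box : List (Int × Int)), Dom_rect_from_box_py box → Pre_rect_from_box_py box → Spec_rect_from_box_py box (rect_from_box_py box)

-- ===== LEMMAS AND PROOFS =====

-- B's fused fold computes the running mins and maxes, given the invariants left ≤ right, top ≤ bottom.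
theorem pvFoldB_eq (rest : List (Int × Int)) (l r t b : Int) (hx : l ≤ r) (hy : t ≤ b) :
    rest.foldl pvStepB (l, r, t, b) =
      (rest.foldl (fun a p => min a p.1) l, rest.foldl (fun a p => max a p.1) r,
       rest.foldl (fun a p => min a p.2) t, rest.foldl (fun a p => max a p.2) b) := by
  induction rest generalizing l r t b with
  | nil => rfl
  | cons p ps ih =>
      have hstep : pvStepB (l, r, t, b) p = (min l p.1, max r p.1, min t p.2, max b p.2) := by
        simp only [pvStepB]
        split_ifs with h1 h2 h3 h4 h5 h6 h7 h8 <;> simp_all <;> omega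
      simp only [List.foldl_cons, hstep]
      exact ih _ _ _ _ (le_trans (min_le_left _ _) (le_trans hx (le_max_left _ _)))
                       (le_trans (min_le_left _ _) (le_trans hy (le_max_left _ _)))

-- ===== VERDICT (by name: the statement is the Claim_ definition above) =====
theorem rect_from_box_py_spec : Claim_equal_rect_from_box_py := by
  intro box _ hpre
  unfold Spec_rect_from_box_py
  match box with
  | [] => exact absurd rfl hpre
  | (px, py) :: rest =>
      simp only [rect_from_box_py, rect_from_box_py_alt, List.map_cons,
        PySem.List.min?_id_cons, PySem.List.max?_id_cons, List.foldl_map,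
        pvFoldB_eq rest px px py py le_rfl le_rfl]
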